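-- pv_equiv track=rewrite | github.com/YSofuoglu/Coding | z78_gravitation.py | f
-- ===== SOURCE A (Python) =====
-- def f(m):
--     c = []
--     y = [[m[i][j]  for i in range(len(m))] for j in range(len(m[0]))]
--     for s in y:
--       if '#' not in s:
--         c.append(0)
--       else:
--         c.append(s[s.index('#'):].count('.'))
--     return sorted([i for i,x in enumerate(c) if x==min(c)])
-- ===== SOURCE B (Python) =====
-- def _step(p, x):
--     if x == '#':
--         return (True, p[1])
--     elif x == '.' and p[0]:
--         return (p[0], p[1] + 1)
--     else:
--         return p
--
-- def f(m):
--     w = len(m[0])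
--     st = [(False, 0)] * w
--     for row in m:
--         for j in range(w):
--             st[j] = _step(st[j], row[j])
--     mn = min(c for _, c in st)
--     return sorted(j for j, (_, c) in enumerate(st) if c == mn)
-- ===== Notes on version B (the rewrite author's own statement) =====
-- stated objective: alternative
-- what changed: Replaces A's transpose-then-index/slice/count per column by a single top-to-bottom streaming pass keeping per-column (seen-'#', dot-count) state, then selects the argmin columns.
-- outside the precondition, e.g. on f([[]]): A returns [], B raises ValueError
import Mathlib
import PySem

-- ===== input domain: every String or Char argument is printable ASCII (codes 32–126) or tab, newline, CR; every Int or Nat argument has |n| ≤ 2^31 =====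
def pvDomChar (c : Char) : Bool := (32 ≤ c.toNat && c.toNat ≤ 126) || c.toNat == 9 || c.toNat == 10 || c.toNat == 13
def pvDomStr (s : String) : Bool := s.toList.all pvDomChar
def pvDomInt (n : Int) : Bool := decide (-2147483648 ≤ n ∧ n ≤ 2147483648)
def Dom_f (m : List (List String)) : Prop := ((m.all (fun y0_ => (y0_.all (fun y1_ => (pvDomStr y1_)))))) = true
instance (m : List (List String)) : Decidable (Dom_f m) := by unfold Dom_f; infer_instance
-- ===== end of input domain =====

-- B replaces A's transpose-then-slice/count per column by one streaming pass over the rows with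
-- per-column (seen-'#', dot-count) state; same cost, different traversal (objective: alternative).

-- ===== PORT A =====
def f (m : List (List String)) : List Int :=
  let y := (List.range (PySem.List.pyGetD m 0 []).length).map (fun (j : Nat) =>
    (List.range m.length).map (fun (i : Nat) =>
      PySem.List.pyGetD (PySem.List.pyGetD m (i : Int) []) (j : Int) ""))
  let c := y.foldl (fun c s =>
    if ¬ (s.contains "#") then c ++ [(0 : Int)]
    else c ++ [((PySem.List.slice s (some (((PySem.List.index? s "#").getD 0 : Nat) : Int)) none).count "." : Int)]) []
  let mn := (PySem.List.min? c (fun x => x)).getD 0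
  PySem.List.sorted
    (((PySem.List.enumerate c 0).filter (fun p => p.2 == mn)).map (fun p => p.1))
    (fun x => x) false

-- ===== PORT B =====
-- _step in Source B
def fStep (p : Bool × Int) (x : String) : Bool × Int :=
  if x == "#" then (true, p.2)
  else if x == "." && p.1 then (p.1, p.2 + 1)
  else p

def f_alt (m : List (List String)) : List Int :=
  let w := (PySem.List.pyGetD m 0 []).length
  let st := m.foldl (fun st row =>
      (List.range w).foldl (fun st (j : Nat) =>
        st.set j (fStep (st.getD j (false, 0)) (PySem.List.pyGetD row (j : Int) ""))) st)
    (List.replicate w ((false : Bool), (0 : Int)))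
  let mn := (PySem.List.min? (st.map Prod.snd) (fun x => x)).getD 0
  PySem.List.sorted
    (((PySem.List.enumerate st 0).filter (fun p => p.2.2 == mn)).map (fun p => p.1))
    (fun x => x) false

-- ===== PRECONDITION & SPEC =====
-- Pre_f excludes the inputs where Python A raises (empty m: IndexError on m[0]; a row shorter
-- than row 0: IndexError on m[i][j]) and, in addition, zero-width grids (m[0] == []), where A
-- happens to return [] only because min(c) is never evaluated inside the empty comprehension,
-- while B's min() naturally raises ValueError there.
def Pre_f (m : List (List String)) : Prop :=
  m ≠ [] ∧ 0 < m.headI.length ∧ ∀ row ∈ m, m.headI.length ≤ row.length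
instance (m : List (List String)) : Decidable (Pre_f m) := by unfold Pre_f; infer_instance
def pvWitness_f : List (List String) := [["#", "."], [".", "."]]
def Spec_f (m : List (List String)) (out : List Int) : Prop := out = f_alt m
instance (m : List (List String)) (out : List Int) : Decidable (Spec_f m out) := by unfold Spec_f; infer_instance

-- ===== CLAIM (what is proved, stated in full; the proofs are below) =====
def Claim_equal_f : Prop := ∀ (m : List (List String)), Dom_f m → Pre_f m → Spec_f m (f m)

-- ===== LEMMAS AND PROOFS =====

-- the value A's loop appends for one transposed column s
def colCount (s : List String) : Int :=
  if ¬ (s.contains "#") then 0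
  else ((PySem.List.slice s (some (((PySem.List.index? s "#").getD 0 : Nat) : Int)) none).count "." : Int)

lemma foldl_app_colCount (L : List (List String)) : ∀ (acc : List Int),
    L.foldl (fun c s =>
      if ¬ (s.contains "#") then c ++ [(0 : Int)]
      else c ++ [((PySem.List.slice s (some (((PySem.List.index? s "#").getD 0 : Nat) : Int)) none).count "." : Int)]) acc
    = acc ++ L.map colCount := by
  induction L with
  | nil => intro acc; simp
  | cons s L ih =>
      intro acc
      rw [List.foldl_cons]
      have hstep : (if ¬ (s.contains "#") then acc ++ [(0 : Int)]
          else acc ++ [((PySem.List.slice s (some (((PySem.List.index? s "#").getD 0 : Nat) : Int)) none).count "." : Int)])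
          = acc ++ [colCount s] := by
        by_cases h : "#" ∈ s <;> simp [colCount, h]
      rw [hstep, ih]
      simp

lemma map_range_getD {α β : Type} (l : List α) (d : α) (F : α → β) :
    (List.range l.length).map (fun i => F (l.getD i d)) = l.map F := by
  induction l with
  | nil => simp
  | cons a l ih =>
      simp only [List.length_cons, List.range_succ_eq_map, List.map_cons, List.map_map]
      simpa using ih

lemma step_true (s : List String) : ∀ (c : Int),
    s.foldl fStep (true, c) = (true, c + (PySem.List.count s "." : Int)) := by
  induction s with
  | nil => intro c; simp [PySem.List.count_eq]
  | cons a s ih =>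
      intro c
      by_cases h2 : a = "."
      · subst h2
        have h : fStep (true, c) "." = (true, c + 1) := by simp [fStep]
        rw [List.foldl_cons, h, ih, PySem.List.count_eq, PySem.List.count_eq,
          List.count_cons]
        simp
        ring
      · have h : fStep (true, c) a = (true, c) := by
          by_cases h1 : a = "#" <;> simp [fStep, h1, h2]
        rw [List.foldl_cons, h, ih, PySem.List.count_eq, PySem.List.count_eq,
          List.count_cons]
        simp [h2]

lemma stream_col (s : List String) :
    s.foldl fStep (false, 0) = (s.contains "#", colCount s) := by
  induction s with
  | nil => simp [colCount]
  | cons a s ih =>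
      rw [List.foldl_cons]
      by_cases h1 : a = "#"
      · subst h1
        have h0 : fStep (false, 0) "#" = (true, 0) := by simp [fStep]
        rw [h0, step_true]
        have hidx : PySem.List.index? ("#" :: s) "#" = some 0 :=
          PySem.List.index?_cons_self "#" s
        have hcc : colCount ("#" :: s) = (PySem.List.count ("#" :: s) "." : Int) := by
          rw [colCount, if_neg (by simp)]
          rw [hidx]
          simp
        rw [hcc]
        simp [PySem.List.count_eq]
      · have h0 : fStep (false, 0) a = (false, 0) := by
          by_cases h2 : a = "." <;> simp [fStep, h1, h2]
        rw [h0, ih]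
        have h1' : ("#" : String) ≠ a := fun h => h1 h.symm
        have hfst : (a :: s).contains "#" = s.contains "#" := by
          simp [h1']
        have hsnd : colCount (a :: s) = colCount s := by
          by_cases hc : s.contains "#"
          · obtain ⟨k, hk⟩ := Option.isSome_iff_exists.mp
              ((PySem.List.index?_isSome_iff s "#").mpr (by simpa using hc))
            have hidx : PySem.List.index? (a :: s) "#" = some (k + 1) := by
              rw [PySem.List.index?_cons_of_ne s h1, hk]; rfl
            rw [colCount, colCount, if_neg (fun hcon => hcon (by rw [hfst]; exact hc)),
              if_neg (fun hcon => hcon hc), hidx, hk]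
            simp only [Option.getD_some]
            rw [PySem.List.slice_from_natCast, PySem.List.slice_from_natCast,
              List.drop_succ_cons]
          · have hc2 : (a :: s).contains "#" = false := by
              rw [hfst]; simpa using hc
            rw [colCount, colCount, if_pos (by rw [hc2]; simp), if_pos hc]
        rw [hfst, hsnd]

lemma fold_set_shift (g : Nat → String) (l : List Nat) : ∀ (b : Bool × Int) (st : List (Bool × Int)),
    (l.map Nat.succ).foldl (fun st j => st.set j (fStep (st.getD j (false, 0)) (g j))) (b :: st)
    = b :: l.foldl (fun st j => st.set j (fStep (st.getD j (false, 0)) (g j.succ))) st := by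
  induction l with
  | nil => intro b st; simp
  | cons a l ih =>
      intro b st
      simp only [List.map_cons, List.foldl_cons, List.getD_cons_succ, List.set_cons_succ]
      exact ih b _

lemma inner_fold (w : Nat) : ∀ (g : Nat → String) (A : Nat → Bool × Int),
    (List.range w).foldl (fun st j => st.set j (fStep (st.getD j (false, 0)) (g j)))
      ((List.range w).map A)
    = (List.range w).map (fun j => fStep (A j) (g j)) := by
  induction w with
  | zero => intro g A; simp
  | succ n ih =>
      intro g A
      rw [List.range_succ_eq_map]
      simp only [List.map_cons, List.map_map, List.foldl_cons, List.getD_cons_zero,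
        List.set_cons_zero]
      rw [fold_set_shift g (List.range n) (fStep (A 0) (g 0)) ((List.range n).map (A ∘ Nat.succ))]
      have := ih (fun j => g j.succ) (A ∘ Nat.succ)
      simp only [Function.comp_def] at this ⊢
      rw [this]

lemma outer_fold (w : Nat) : ∀ (m : List (List String)) (A : Nat → Bool × Int),
    m.foldl (fun st row =>
      (List.range w).foldl (fun st j =>
        st.set j (fStep (st.getD j (false, 0)) (row.getD j ""))) st)
      ((List.range w).map A)
    = (List.range w).map (fun j => (m.map (fun row => row.getD j "")).foldl fStep (A j)) := by
  intro m
  induction m with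
  | nil => intro A; simp
  | cons row m ih =>
      intro A
      rw [List.foldl_cons, inner_fold w (fun j => row.getD j "") A, ih]
      simp

lemma enumerate_map {α β : Type} (g : α → β) (l : List α) : ∀ (s : Int),
    PySem.List.enumerate (l.map g) s = (PySem.List.enumerate l s).map (fun p => (p.1, g p.2)) := by
  induction l with
  | nil => intro s; simp [PySem.List.enumerate_nil]
  | cons a l ih => intro s; simp [PySem.List.enumerate_cons, ih]

-- ===== VERDICT (by name: the statement is the Claim_ definition above) =====
theorem f_spec : Claim_equal_f := by
  intro m _ _
  unfold Spec_f f f_alt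
  simp only [PySem.List.pyGetD_natCast, PySem.List.pyGetD_zero]
  have hrep : List.replicate (m.getD 0 []).length ((false : Bool), (0 : Int))
      = (List.range (m.getD 0 []).length).map (fun _ => ((false : Bool), (0 : Int))) := by
    simp
  rw [hrep, outer_fold (m.getD 0 []).length m (fun _ => ((false : Bool), (0 : Int)))]
  rw [foldl_app_colCount]
  simp only [List.nil_append]
  have hy : ((List.range (m.getD 0 []).length).map (fun j =>
        (List.range m.length).map (fun i => (m.getD i []).getD j ""))).map colCount
      = (List.range (m.getD 0 []).length).map
          (fun j => colCount (m.map (fun row => row.getD j ""))) := by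
    rw [List.map_map]
    exact List.map_congr_left (fun j _ => by
      simp only [Function.comp_apply]
      rw [map_range_getD m [] (fun row => row.getD j "")])
  rw [hy]
  have hst : (List.range (m.getD 0 []).length).map
        (fun j => (m.map (fun row => row.getD j "")).foldl fStep (false, 0))
      = (List.range (m.getD 0 []).length).map
          (fun j => ((m.map (fun row => row.getD j "")).contains "#",
                      colCount (m.map (fun row => row.getD j "")))) :=
    List.map_congr_left (fun j _ => stream_col _)
  rw [hst]
  set stl := (List.range (m.getD 0 []).length).map
      (fun j => ((m.map (fun row => row.getD j "")).contains "#",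
                  colCount (m.map (fun row => row.getD j "")))) with hstl
  have hsnd : stl.map Prod.snd
      = (List.range (m.getD 0 []).length).map
          (fun j => colCount (m.map (fun row => row.getD j ""))) := by
    rw [hstl, List.map_map]; rfl
  rw [← hsnd, enumerate_map Prod.snd stl 0, List.filter_map, List.map_map]
  rfl
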